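-- pv_equiv track=rewrite | github.com/danilocesar1002/sort-tests | tex-heaps.py | heapToTeX
-- ===== SOURCE A (Python) =====
-- def log2Floor(n):
--     res = 1
--     while (n >> res) > 0:
--         res += 1
--
--     return res - 1
--
-- def heapToTeX(arr,
--              heapSize = -1,
--              config="[scale=0.7,heapnode/.style={circle, draw=black, very thick}" +
--              ",arraynode/.style={circle, draw=black, fill=black!20, very thick}]"
--              ):
--     assert len(arr) > 0
--     assert 0 <= heapSize <= len(arr)
--     if heapSize == -1:
--         heapSize = len(arr)
--
--
--     coords = [[0, log2Floor(len(arr))]] + [None for _ in range(len(arr) - 1)]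
--     for i in range(len(arr) // 2):
--         left, right = i * 2 + 1, i * 2 + 2
--         siblingDistance = 2 ** (coords[i][1] - 1)
--
--         if left < len(arr):
--             coords[left] = [
--                 coords[i][0] - siblingDistance,
--                 coords[i][1] - 1
--             ]
--         if right < len(arr):
--             coords[right] = [
--                 coords[i][0] + siblingDistance,
--                 coords[i][1] - 1
--             ]
--
--     heapNodes = ["\\node[heapnode] ({}) at ({}, {}) {{{}}};".format(i, coords[i][0], coords[i][1], arr[i]) for i in range(heapSize)]
--     arrayNodes = ["\\node[arraynode] ({}) at ({}, {}) {{{}}};".format(i, coords[i][0], coords[i][1], arr[i]) for i in range(heapSize, len(arr))]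
--     nodes = heapNodes + arrayNodes
--
--     lines = []
--     for i in range(len(arr) // 2):
--         left, right = i * 2 + 1, i * 2 + 2
--         if left < heapSize:
--             lines.append("({}) edge ({})".format(i, left))
--         if right < heapSize:
--             lines.append("({}) edge ({})".format(i, right))
--
--
--     return  "\\begin{{tikzpicture}}{}{}\n{}\n\\end{{tikzpicture}}".format(config, "\n".join(nodes), "\\draw\n" + "\n".join(lines) + ";")
-- ===== SOURCE B (Python) =====
-- def heapToTeX(arr,
--              heapSize = -1,
--              config="[scale=0.7,heapnode/.style={circle, draw=black, very thick}" +
--              ",arraynode/.style={circle, draw=black, fill=black!20, very thick}]"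
--              ):
--     assert len(arr) > 0
--     assert 0 <= heapSize <= len(arr)
--     n = len(arr)
--     top = n.bit_length() - 1
--
--     def coord(i):
--         if i == 0:
--             return 0, top
--         x, y = coord((i - 1) // 2)
--         d = 2 ** (y - 1)
--         return (x - d, y - 1) if i % 2 == 1 else (x + d, y - 1)
--
--     def node(i):
--         x, y = coord(i)
--         if i < heapSize:
--             return "\\node[heapnode] ({}) at ({}, {}) {{{}}};".format(i, x, y, arr[i])
--         return "\\node[arraynode] ({}) at ({}, {}) {{{}}};".format(i, x, y, arr[i])
--
--     nodes = "\n".join(node(i) for i in range(n))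
--     edges = "\n".join("({}) edge ({})".format((c - 1) // 2, c) for c in range(1, heapSize))
--     return "\\begin{{tikzpicture}}{}{}\n\\draw\n{};\n\\end{{tikzpicture}}".format(config, nodes, edges)
-- ===== Notes on version B (the rewrite author's own statement) =====
-- stated objective: simpler
-- what changed: B replaces A's iterative parent-index coordinate-fill sweep over a None-initialised array (plus a hand-rolled bit-length while-loop) by a direct per-node recursion computing each node's coordinate from its parent's, merges A's two node comprehensions into one styled comprehension, and replaces A's conditional left/right edge-append loop over parents by a closed-form comprehension over the child indices 1..heapSize-1.
import Mathlib
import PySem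

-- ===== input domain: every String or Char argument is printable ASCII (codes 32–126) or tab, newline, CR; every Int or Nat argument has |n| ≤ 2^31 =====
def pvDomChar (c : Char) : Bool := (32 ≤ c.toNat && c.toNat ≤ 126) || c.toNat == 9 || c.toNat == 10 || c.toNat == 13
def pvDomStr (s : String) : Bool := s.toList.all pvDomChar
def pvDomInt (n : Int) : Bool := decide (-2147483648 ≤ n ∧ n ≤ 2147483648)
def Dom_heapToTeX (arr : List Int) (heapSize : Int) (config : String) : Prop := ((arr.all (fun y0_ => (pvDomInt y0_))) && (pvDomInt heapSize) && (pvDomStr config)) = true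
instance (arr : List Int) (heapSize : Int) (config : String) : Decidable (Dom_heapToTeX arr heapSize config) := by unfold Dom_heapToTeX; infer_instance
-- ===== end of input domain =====

-- B replaces A's parent-index coordinate-fill sweep over a None-initialised array by a direct
-- per-node recursion on the tree structure (coordinate from the parent's coordinate), replaces the
-- two node comprehensions with one styled comprehension, and replaces the conditional edge-append
-- loop with a closed-form comprehension over the child indices 1..heapSize-1 (objective: simpler).

-- ===== PORT A =====
-- 'while (n >> res) > 0: res += 1' — fuel n.toNat + 2 is a pure totality guard: the loop runs at
-- most bitLength n ≤ n.toNat + 1 times (and 0 times for n ≤ 0), so the guard never alters the result.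
-- res ≥ 1 on every call, so 'res.toNat' is exact for Python's 'n >> res'.
def log2FloorGo (n : Int) (fuel : Nat) (res : Int) : Int :=
  match fuel with
  | 0 => res
  | f + 1 => if 0 < n >>> res.toNat then log2FloorGo n f (res + 1) else res

def log2Floor (n : Int) : Int := log2FloorGo n (n.toNat + 2) 1 - 1

-- coords[i] — the inner default (0, 0) is unreachable under Pre_: every slot read has been filled.
def coordAt (coords : List (Option (Int × Int))) (i : Int) : Int × Int :=
  (PySem.List.pyGetD coords i none).getD (0, 0)

-- one iteration of A's coordinate-fill loop ('2 ** (y - 1)': the exponent is ≥ 0 whenever the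
-- Python evaluates it under Pre_ — an internal node's level is ≥ 1 — so '.toNat' is exact)
def fillStep (n : Int) (coords : List (Option (Int × Int))) (i : Int) : List (Option (Int × Int)) :=
  let left := i * 2 + 1
  let right := i * 2 + 2
  let xy := coordAt coords i
  let siblingDistance : Int := 2 ^ (xy.2 - 1).toNat
  let coords := if left < n then PySem.List.pySetD coords left (some (xy.1 - siblingDistance, xy.2 - 1)) else coords
  if right < n then PySem.List.pySetD coords right (some (xy.1 + siblingDistance, xy.2 - 1)) else coords

def heapToTeX (arr : List Int) (heapSize : Int) (config : String) : String :=
  -- the two asserts raise outside Pre_; under Pre_ they pass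
  let n : Int := PySem.List.len arr
  let heapSize : Int := if heapSize == -1 then n else heapSize
  let coords : List (Option (Int × Int)) :=
    [some (0, log2Floor n)] ++ List.replicate (n - 1).toNat none
  let coords := (PySem.List.pyRange 0 (PySem.Int.floordiv n 2) 1).foldl (fillStep n) coords
  let heapNodes := (PySem.List.pyRange 0 heapSize 1).map (fun i =>
    "\\node[heapnode] (" ++ PySem.Int.toStr i ++ ") at (" ++ PySem.Int.toStr (coordAt coords i).1 ++
    ", " ++ PySem.Int.toStr (coordAt coords i).2 ++ ") {" ++ PySem.Int.toStr (PySem.List.pyGetD arr i 0) ++ "};")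
  let arrayNodes := (PySem.List.pyRange heapSize n 1).map (fun i =>
    "\\node[arraynode] (" ++ PySem.Int.toStr i ++ ") at (" ++ PySem.Int.toStr (coordAt coords i).1 ++
    ", " ++ PySem.Int.toStr (coordAt coords i).2 ++ ") {" ++ PySem.Int.toStr (PySem.List.pyGetD arr i 0) ++ "};")
  let nodes := heapNodes ++ arrayNodes
  let lines := (PySem.List.pyRange 0 (PySem.Int.floordiv n 2) 1).foldl (fun acc i =>
    let left := i * 2 + 1
    let right := i * 2 + 2
    let acc := if left < heapSize then acc ++ ["(" ++ PySem.Int.toStr i ++ ") edge (" ++ PySem.Int.toStr left ++ ")"] else acc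
    if right < heapSize then acc ++ ["(" ++ PySem.Int.toStr i ++ ") edge (" ++ PySem.Int.toStr right ++ ")"] else acc) []
  "\\begin{tikzpicture}" ++ config ++ PySem.Str.join "\n" nodes ++ "\n" ++
    ("\\draw\n" ++ PySem.Str.join "\n" lines ++ ";") ++ "\n\\end{tikzpicture}"

-- ===== PORT B =====
-- coord(i): the node's coordinate computed recursively from its parent's ('2 ** (y - 1)': exponent
-- ≥ 0 on every evaluation under Pre_, so '.toNat' is exact, as in port A)
def bCoord (top : Int) : Nat → Int × Int
  | 0 => (0, top)
  | i + 1 =>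
    let xy := bCoord top (i / 2)          -- ((i+1) - 1) // 2
    let d : Int := 2 ^ (xy.2 - 1).toNat
    if (i + 1) % 2 == 1 then (xy.1 - d, xy.2 - 1) else (xy.1 + d, xy.2 - 1)
decreasing_by omega

def bNode (arr : List Int) (heapSize : Int) (top : Int) (i : Int) : String :=
  let xy := bCoord top i.toNat            -- i ∈ range(n), so i ≥ 0 and '.toNat' is exact
  if i < heapSize then
    "\\node[heapnode] (" ++ PySem.Int.toStr i ++ ") at (" ++ PySem.Int.toStr xy.1 ++
      ", " ++ PySem.Int.toStr xy.2 ++ ") {" ++ PySem.Int.toStr (PySem.List.pyGetD arr i 0) ++ "};"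
  else
    "\\node[arraynode] (" ++ PySem.Int.toStr i ++ ") at (" ++ PySem.Int.toStr xy.1 ++
      ", " ++ PySem.Int.toStr xy.2 ++ ") {" ++ PySem.Int.toStr (PySem.List.pyGetD arr i 0) ++ "};"

def heapToTeX_alt (arr : List Int) (heapSize : Int) (config : String) : String :=
  -- the two asserts raise outside Pre_; under Pre_ they pass
  let n : Int := PySem.List.len arr
  let top : Int := (PySem.Int.bitLength n : Int) - 1
  let nodes := PySem.Str.join "\n" ((PySem.List.pyRange 0 n 1).map (bNode arr heapSize top))
  let edges := PySem.Str.join "\n" ((PySem.List.pyRange 1 heapSize 1).map (fun c =>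
    "(" ++ PySem.Int.toStr (PySem.Int.floordiv (c - 1) 2) ++ ") edge (" ++ PySem.Int.toStr c ++ ")"))
  "\\begin{tikzpicture}" ++ config ++ nodes ++ "\n\\draw\n" ++ edges ++ ";\n\\end{tikzpicture}"

-- ===== PRECONDITION & SPEC =====
-- exactly where A's two asserts pass (A raises AssertionError otherwise — note heapSize's
-- default -1 itself fails the second assert, so the 'heapSize == -1' branch is dead code)
def Pre_heapToTeX (arr : List Int) (heapSize : Int) (config : String) : Prop :=
  arr ≠ [] ∧ 0 ≤ heapSize ∧ heapSize ≤ arr.length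

instance (arr : List Int) (heapSize : Int) (config : String) : Decidable (Pre_heapToTeX arr heapSize config) := by
  unfold Pre_heapToTeX; infer_instance

def pvWitness_heapToTeX : List Int × Int × String := ([5, 3, 4, 1], 3, "[scale=0.7]")

def Spec_heapToTeX (arr : List Int) (heapSize : Int) (config : String) (out : String) : Prop := out = heapToTeX_alt arr heapSize config
instance (arr : List Int) (heapSize : Int) (config : String) (out : String) : Decidable (Spec_heapToTeX arr heapSize config out) := by unfold Spec_heapToTeX; infer_instance

-- ===== CLAIM (what is proved, stated in full; the proofs are below) =====
def Claim_equal_heapToTeX : Prop := ∀ (arr : List Int) (heapSize : Int) (config : String), Dom_heapToTeX arr heapSize config → Pre_heapToTeX arr heapSize config → Spec_heapToTeX arr heapSize config (heapToTeX arr heapSize config)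

-- ===== LEMMAS AND PROOFS =====

-- the loop condition 'n >> res > 0' for positive n, in terms of bit length
lemma shift_pos_iff (m r : Nat) (hm : 0 < m) :
    (0 < ((m:Int) >>> r)) ↔ r < PySem.Int.bitLength (m:Int) := by
  have hcast : ((m:Int) >>> r) = ((m >>> r : Nat) : Int) := rfl
  rw [hcast]
  have hb1 : (m:Int).natAbs < 2 ^ PySem.Int.bitLength (m:Int) := PySem.Int.lt_two_pow_bitLength _
  have hb2 : 2 ^ (PySem.Int.bitLength (m:Int) - 1) ≤ (m:Int).natAbs :=
    PySem.Int.two_pow_bitLength_le _ (by exact_mod_cast hm.ne')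
  simp only [Int.natAbs_natCast] at hb1 hb2
  rw [Nat.shiftRight_eq_div_pow]
  constructor
  · intro h
    by_contra h'
    have hlt : m < 2 ^ r :=
      lt_of_lt_of_le hb1 (Nat.pow_le_pow_right (by norm_num) (by omega))
    rw [Nat.div_eq_of_lt hlt] at h
    simp at h
  · intro h
    have h2 : 2 ^ r ≤ m :=
      le_trans (Nat.pow_le_pow_right (by norm_num) (by omega)) hb2
    have : 0 < m / 2 ^ r := Nat.div_pos h2 (Nat.two_pow_pos r)
    exact_mod_cast this

lemma go_eq (m : Nat) (hm : 0 < m) : ∀ (fuel res : Nat), 1 ≤ res →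
    res ≤ PySem.Int.bitLength (m:Int) → PySem.Int.bitLength (m:Int) ≤ res + fuel →
    log2FloorGo (m:Int) fuel (res:Int) = (PySem.Int.bitLength (m:Int) : Int) := by
  intro fuel
  induction fuel with
  | zero =>
    intro res h1 h2 h3
    simp only [log2FloorGo]
    exact_mod_cast Nat.le_antisymm h2 (by omega)
  | succ f ih =>
    intro res h1 h2 h3
    simp only [log2FloorGo, Int.toNat_natCast]
    by_cases hc : res < PySem.Int.bitLength (m:Int)
    · rw [if_pos ((shift_pos_iff m res hm).mpr hc)]
      have := ih (res + 1) (by omega) (by omega) (by omega)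
      rw [show ((res:Int) + 1) = ((res + 1 : Nat) : Int) by push_cast; ring]
      exact this
    · rw [if_neg (by rw [shift_pos_iff m res hm]; omega)]
      exact_mod_cast Nat.le_antisymm h2 (by omega)

lemma bitLength_le (m : Nat) (hm : 0 < m) : PySem.Int.bitLength (m:Int) ≤ m := by
  have hb2 : 2 ^ (PySem.Int.bitLength (m:Int) - 1) ≤ (m:Int).natAbs :=
    PySem.Int.two_pow_bitLength_le _ (by exact_mod_cast hm.ne')
  simp only [Int.natAbs_natCast] at hb2
  have := Nat.lt_two_pow_self (n := PySem.Int.bitLength (m:Int) - 1)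
  omega

-- A's while loop computes exactly B's 'n.bit_length() - 1'
lemma log2Floor_eq (m : Nat) (hm : 0 < m) :
    log2Floor (m:Int) = (PySem.Int.bitLength (m:Int) : Int) - 1 := by
  have hB1 : 1 ≤ PySem.Int.bitLength (m:Int) := by
    by_contra h
    have h0 : PySem.Int.bitLength (m:Int) = 0 := by omega
    have hb2 := shift_pos_iff m 0 hm
    simp [h0] at hb2
    exact absurd (by exact_mod_cast hm : (0:Int) < (m:Int)) (by simpa using hb2)
  unfold log2Floor
  rw [show ((m:Int).toNat + 2) = (m + 2) by simp]
  rw [show (1:Int) = ((1:Nat):Int) by norm_num]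
  rw [go_eq m hm (m+2) 1 le_rfl hB1 (by have := bitLength_le m hm; omega)]

lemma bCoord_odd (top : Int) (k : Nat) :
    bCoord top (2*k+1) = ((bCoord top k).1 - 2^((bCoord top k).2-1).toNat, (bCoord top k).2 - 1) := by
  rw [bCoord]
  have h1 : (2*k)/2 = k := by omega
  have h2 : (2*k+1) % 2 = 1 := by omega
  simp [h1, h2]

lemma bCoord_even (top : Int) (k : Nat) :
    bCoord top (2*k+2) = ((bCoord top k).1 + 2^((bCoord top k).2-1).toNat, (bCoord top k).2 - 1) := by
  rw [show 2*k+2 = (2*k+1)+1 by ring, bCoord]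
  have h1 : (2*k+1)/2 = k := by omega
  have h2 : (2*k+1+1) % 2 = 0 := by omega
  simp [h1, h2]

-- invariant of A's coordinate-fill loop: after k iterations every slot j ≤ 2k holds B's coord(j)
lemma fill_inv (N : Nat) (top : Int) (hN : 0 < N) (k : Nat) (hk : k ≤ N/2) :
    ((List.range k).foldl (fun acc (i : Nat) => fillStep (N:Int) acc (i:Int))
      (some (0,top) :: List.replicate (N-1) none)).length = N ∧
    ∀ j, j < N → j ≤ 2*k →
      ((List.range k).foldl (fun acc (i : Nat) => fillStep (N:Int) acc (i:Int))
        (some (0,top) :: List.replicate (N-1) none))[j]? = some (some (bCoord top j)) := by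
  induction k with
  | zero =>
    refine ⟨by simp; omega, ?_⟩
    intro j hj hj2
    interval_cases j
    simp [bCoord]
  | succ k ih =>
    obtain ⟨ihl, ihg⟩ := ih (by omega)
    rw [List.range_succ, List.foldl_append]
    set out := (List.range k).foldl (fun acc (i : Nat) => fillStep (N:Int) acc (i:Int))
      (some (0,top) :: List.replicate (N-1) none) with hout
    simp only [List.foldl_cons, List.foldl_nil]
    have hkN : k < N := by omega
    have hleft : 2*k+1 < N := by omega
    have hread : coordAt out (k:Int) = bCoord top k := by
      rw [coordAt, PySem.List.pyGetD_natCast]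
      rw [List.getD_eq_getElem?_getD, ihg k hkN (by omega)]
      rfl
    simp only [fillStep, hread]
    rw [show ((k:Int)*2+1) = ((2*k+1 : Nat):Int) by push_cast; ring,
        show ((k:Int)*2+2) = ((2*k+2 : Nat):Int) by push_cast; ring]
    rw [if_pos (by exact_mod_cast hleft : ((2*k+1:Nat):Int) < (N:Int))]
    simp only [PySem.List.pySetD_natCast]
    by_cases hr : 2*k+2 < N
    · rw [if_pos (by exact_mod_cast hr : ((2*k+2:Nat):Int) < (N:Int))]
      refine ⟨by simp [ihl], ?_⟩
      intro j hj hj2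
      rw [List.getElem?_set, List.getElem?_set]
      simp only [List.length_set, ihl]
      by_cases h2 : j = 2*k+2
      · subst h2
        rw [if_pos rfl, if_pos hr, bCoord_even]
      · rw [if_neg (by omega)]
        by_cases h1 : j = 2*k+1
        · subst h1
          rw [if_pos rfl, if_pos hleft, bCoord_odd]
        · rw [if_neg (by omega)]
          exact ihg j hj (by omega)
    · rw [if_neg (by exact_mod_cast hr : ¬ ((2*k+2:Nat):Int) < (N:Int))]
      refine ⟨by simp [ihl], ?_⟩
      intro j hj hj2
      rw [List.getElem?_set]
      simp only [ihl]
      by_cases h1 : j = 2*k+1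
      · subst h1
        rw [if_pos rfl, if_pos hleft, bCoord_odd]
      · rw [if_neg (by omega)]
        exact ihg j hj (by omega)

-- A's conditional edge-append loop flattens to B's closed comprehension over child indices
lemma flat_edges (E : Nat → String) (h : Nat) : ∀ m,
    (List.range m).flatMap (fun i =>
      (if 2*i+1 < h then [E (2*i+1)] else []) ++ (if 2*i+2 < h then [E (2*i+2)] else []))
    = (List.range (min (h-1) (2*m))).map (fun k => E (k+1)) := by
  intro m
  induction m with
  | zero => simp
  | succ m ih =>
    rw [List.range_succ, List.flatMap_append, ih]
    simp only [List.flatMap_cons, List.flatMap_nil, List.append_nil]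
    rcases Nat.lt_or_ge (2*m+1) h with h1 | h1
    · rcases Nat.lt_or_ge (2*m+2) h with h2 | h2
      · rw [if_pos h1, if_pos h2]
        rw [show min (h-1) (2*(m+1)) = (min (h-1) (2*m)) + 1 + 1 by omega,
            show min (h-1) (2*m) = 2*m by omega]
        rw [List.range_succ, List.range_succ, List.map_append, List.map_append]
        simp
      · rw [if_pos h1, if_neg (by omega)]
        rw [show min (h-1) (2*(m+1)) = (min (h-1) (2*m)) + 1 by omega,
            show min (h-1) (2*m) = 2*m by omega]
        rw [List.range_succ, List.map_append]
        simp
    · rw [if_neg (by omega), if_neg (by omega)]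
      rw [show min (h-1) (2*(m+1)) = min (h-1) (2*m) by omega]
      simp

-- the two assemblies of literals around equal node/edge blocks are the same string
lemma assemble_eq (a c : String) :
    a ++ "\n" ++ ("\\draw\n" ++ c ++ ";") ++ "\n\\end{tikzpicture}"
      = a ++ "\n\\draw\n" ++ c ++ ";\n\\end{tikzpicture}" := by
  apply String.ext
  simp

-- ===== VERDICT (by name: the statement is the Claim_ definition above) =====
theorem heapToTeX_spec : Claim_equal_heapToTeX := by
  intro arr hS config hdom hpre
  obtain ⟨hne, h0, hle⟩ := hpre
  unfold Spec_heapToTeX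
  obtain ⟨h, rfl⟩ : ∃ h : Nat, hS = (h:Int) := ⟨hS.toNat, (Int.toNat_of_nonneg h0).symm⟩
  set N := arr.length with hNdef
  have hN : 0 < N := List.length_pos_iff.mpr hne
  have hhN : h ≤ N := by exact_mod_cast hle
  simp only [heapToTeX, heapToTeX_alt, PySem.List.len_eq, ← hNdef]
  rw [if_neg (by simp only [beq_iff_eq]; omega)]
  rw [log2Floor_eq N hN]
  set top : Int := (PySem.Int.bitLength (N:Int) : Int) - 1 with htop
  -- the coordinate lists agree
  rw [show PySem.Int.floordiv (N:Int) 2 = ((N/2 : Nat):Int) from by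
        exact_mod_cast PySem.Int.floordiv_natCast N 2]
  rw [PySem.List.pyRange_zero_nat (N/2), List.foldl_map]
  rw [show ((N:Int) - 1).toNat = N - 1 from by omega]
  have hfill := fill_inv N top hN (N/2) le_rfl
  rw [show ([some ((0:Int), top)] ++ List.replicate (N-1) (none : Option (Int × Int)))
        = some ((0:Int), top) :: List.replicate (N-1) none from by simp] at *
  set final := (List.range (N/2)).foldl (fun acc (i : Nat) => fillStep (N:Int) acc (i:Int))
      (some ((0:Int), top) :: List.replicate (N-1) none) with hfinal
  have hcoord : ∀ j : Nat, j < N → coordAt final (j:Int) = bCoord top j := by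
    intro j hj
    rw [coordAt, PySem.List.pyGetD_natCast, List.getD_eq_getElem?_getD,
        hfill.2 j hj (by omega)]
    rfl
  -- node lists agree
  rw [PySem.List.pyRange_zero_nat h, PySem.List.pyRange_zero_nat N,
      PySem.List.pyRange_one (h:Int) (N:Int)]
  rw [show (((N:Int)) - (h:Int)).toNat = N - h from by omega]
  rw [List.map_map, List.map_map, List.map_map]
  have hnodes :
      (List.range h).map ((fun i => "\\node[heapnode] (" ++ PySem.Int.toStr i ++ ") at (" ++
          PySem.Int.toStr (coordAt final i).1 ++ ", " ++ PySem.Int.toStr (coordAt final i).2 ++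
          ") {" ++ PySem.Int.toStr (PySem.List.pyGetD arr i 0) ++ "};") ∘ (fun k : Nat => (k:Int)))
        ++ (List.range (N-h)).map ((fun i => "\\node[arraynode] (" ++ PySem.Int.toStr i ++ ") at (" ++
          PySem.Int.toStr (coordAt final i).1 ++ ", " ++ PySem.Int.toStr (coordAt final i).2 ++
          ") {" ++ PySem.Int.toStr (PySem.List.pyGetD arr i 0) ++ "};") ∘ (fun k : Nat => (h:Int) + (k:Int)))
      = (List.range N).map ((bNode arr (h:Int) top) ∘ (fun k : Nat => (k:Int))) := by
    have hsplit : List.range N = List.range h ++ (List.range (N - h)).map (fun x => h + x) := by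
      conv_lhs => rw [show N = h + (N - h) from by omega]
      exact List.range_add
    rw [hsplit, List.map_append, List.map_map]
    congr 1
    · apply List.map_congr_left
      intro i hi
      have hih : i < h := List.mem_range.mp hi
      simp only [Function.comp_apply, bNode, Int.toNat_natCast]
      rw [if_pos (by exact_mod_cast hih), hcoord i (by omega)]
    · apply List.map_congr_left
      intro k hk
      have hkh : k < N - h := List.mem_range.mp hk
      simp only [Function.comp_apply, bNode]
      rw [show ((h:Int) + (k:Int)) = ((h + k : Nat) : Int) from by push_cast; ring]
      rw [if_neg (by exact_mod_cast (by omega : ¬ (h + k < h)))]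
      simp only [Int.toNat_natCast]
      rw [hcoord (h + k) (by omega)]
  rw [hnodes]
  -- edge lists agree
  have hlines :
      List.foldl
        (fun acc (i : Int) =>
          if i * 2 + 2 < (h:Int) then
            (if i * 2 + 1 < (h:Int) then
                acc ++ ["(" ++ PySem.Int.toStr i ++ ") edge (" ++ PySem.Int.toStr (i * 2 + 1) ++ ")"]
              else acc) ++
              ["(" ++ PySem.Int.toStr i ++ ") edge (" ++ PySem.Int.toStr (i * 2 + 2) ++ ")"]
          else
            if i * 2 + 1 < (h:Int) then
              acc ++ ["(" ++ PySem.Int.toStr i ++ ") edge (" ++ PySem.Int.toStr (i * 2 + 1) ++ ")"]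
            else acc)
        [] ((List.range (N/2)).map (fun k : Nat => (k:Int)))
      = (PySem.List.pyRange 1 (h:Int)).map
          (fun c => "(" ++ PySem.Int.toStr (PySem.Int.floordiv (c - 1) 2) ++ ") edge (" ++ PySem.Int.toStr c ++ ")") := by
    rw [List.foldl_map]
    have hbody : ∀ (acc : List String) (i : Nat),
        (if (i:Int) * 2 + 2 < (h:Int) then
            (if (i:Int) * 2 + 1 < (h:Int) then
                acc ++ ["(" ++ PySem.Int.toStr (i:Int) ++ ") edge (" ++ PySem.Int.toStr ((i:Int) * 2 + 1) ++ ")"]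
              else acc) ++
              ["(" ++ PySem.Int.toStr (i:Int) ++ ") edge (" ++ PySem.Int.toStr ((i:Int) * 2 + 2) ++ ")"]
          else
            if (i:Int) * 2 + 1 < (h:Int) then
              acc ++ ["(" ++ PySem.Int.toStr (i:Int) ++ ") edge (" ++ PySem.Int.toStr ((i:Int) * 2 + 1) ++ ")"]
            else acc)
        = acc ++ ((if 2*i+1 < h then ["(" ++ PySem.Int.toStr (((2*i+1-1)/2 : Nat):Int) ++ ") edge (" ++ PySem.Int.toStr ((2*i+1 : Nat):Int) ++ ")"] else [])
            ++ (if 2*i+2 < h then ["(" ++ PySem.Int.toStr (((2*i+2-1)/2 : Nat):Int) ++ ") edge (" ++ PySem.Int.toStr ((2*i+2 : Nat):Int) ++ ")"] else [])) := by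
      intro acc i
      rw [show ((i:Int)*2+1) = ((2*i+1 : Nat):Int) from by push_cast; ring,
          show ((i:Int)*2+2) = ((2*i+2 : Nat):Int) from by push_cast; ring,
          show ((2*i+1-1)/2 : Nat) = i from by omega,
          show ((2*i+2-1)/2 : Nat) = i from by omega]
      split_ifs <;> first | (exfalso; omega) | simp [List.append_assoc]
    have hfun := funext (fun acc => funext (fun i => hbody acc i))
    simp only at hfun
    rw [hfun, PySem.List.foldl_append_eq_flatMap, List.nil_append]
    rw [flat_edges (fun c : Nat =>
          "(" ++ PySem.Int.toStr (((c-1)/2 : Nat):Int) ++ ") edge (" ++ PySem.Int.toStr ((c : Nat):Int) ++ ")") h (N/2)]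
    rw [show min (h-1) (2*(N/2)) = h - 1 from by omega]
    rw [PySem.List.pyRange_one 1 (h:Int), List.map_map]
    rw [show (((h:Int)) - 1).toNat = h - 1 from by omega]
    apply List.map_congr_left
    intro k hk
    simp only [Function.comp_apply]
    rw [show ((1:Int) + (k:Int)) - 1 = ((k:Int)) from by ring]
    rw [show PySem.Int.floordiv ((k:Nat):Int) 2 = ((k/2 : Nat):Int) from by
          exact_mod_cast PySem.Int.floordiv_natCast k 2]
    rw [show ((1:Int) + (k:Int)) = ((k+1 : Nat):Int) from by push_cast; ring]
    rw [show ((k+1-1)/2 : Nat) = k/2 from by omega]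
  rw [hlines]
  exact assemble_eq _ _
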